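-- pv_equiv track=rewrite | github.com/kenning/BookForge-Studio | backend/text_workflows/text_to_script_robust/evaluate.py | find_speaker_mapping_errors
-- ===== SOURCE A (Python) =====
-- from typing import Dict, List, Tuple
--
-- def normalize_speaker_name(name: str) -> str:
--     """Normalize speaker names for comparison."""
--     return name.strip().lower().replace("'", "").replace('"', '')
--
-- def find_speaker_mapping_errors(predicted: List[Tuple[str, str]],
--                                ground_truth: List[Tuple[str, str]]) -> Dict[str, Dict[str, int]]:
--     """Find common speaker mapping errors."""
--     mapping_errors = {}
--
--     if len(predicted) != len(ground_truth):
--         return mapping_errors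
--
--     for (_, pred_speaker), (_, gt_speaker) in zip(predicted, ground_truth):
--         pred_norm = normalize_speaker_name(pred_speaker)
--         gt_norm = normalize_speaker_name(gt_speaker)
--
--         if pred_norm != gt_norm:
--             if gt_norm not in mapping_errors:
--                 mapping_errors[gt_norm] = {}
--             mapping_errors[gt_norm][pred_norm] = mapping_errors[gt_norm].get(pred_norm, 0) + 1
--
--     return mapping_errors
-- ===== SOURCE B (Python) =====
-- from typing import Dict, List, Tuple
--
-- def normalize_speaker_name(name: str) -> str:
--     """Normalize speaker names for comparison."""
--     return name.strip().lower().replace("'", "").replace('"', '')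
--
-- def find_speaker_mapping_errors(predicted: List[Tuple[str, str]],
--                                ground_truth: List[Tuple[str, str]]) -> Dict[str, Dict[str, int]]:
--     """Find common speaker mapping errors.
--
--     Staged algorithm with no incremental counting dict: first materialize the
--     list of mismatched normalized (gt, pred) pairs, then for each distinct
--     gt key (first-occurrence order) select its predicted names and compute
--     each count by scanning that selection with list.count.
--     """
--     if len(predicted) != len(ground_truth):
--         return {}
--
--     pairs = []
--     for (_, pred_speaker), (_, gt_speaker) in zip(predicted, ground_truth):
--         gn = normalize_speaker_name(gt_speaker)
--         pn = normalize_speaker_name(pred_speaker)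
--         if gn != pn:
--             pairs.append((gn, pn))
--
--     result = {}
--     for gt in dict.fromkeys(g for g, _ in pairs):
--         preds = [p for g, p in pairs if g == gt]
--         result[gt] = {p: preds.count(p) for p in dict.fromkeys(preds)}
--     return result
-- ===== Notes on version B (the rewrite author's own statement) =====
-- stated objective: alternative
-- what changed: A counts mismatches by incrementally updating a nested dict-of-counters inside one interleaved loop; B never increments a counter: it materializes the mismatched (gt,pred) pair list, dedupes the gt keys, and for each key computes the per-pred counts by selection and list.count scans (group-by-then-count instead of hash-increment).
import Mathlib
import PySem

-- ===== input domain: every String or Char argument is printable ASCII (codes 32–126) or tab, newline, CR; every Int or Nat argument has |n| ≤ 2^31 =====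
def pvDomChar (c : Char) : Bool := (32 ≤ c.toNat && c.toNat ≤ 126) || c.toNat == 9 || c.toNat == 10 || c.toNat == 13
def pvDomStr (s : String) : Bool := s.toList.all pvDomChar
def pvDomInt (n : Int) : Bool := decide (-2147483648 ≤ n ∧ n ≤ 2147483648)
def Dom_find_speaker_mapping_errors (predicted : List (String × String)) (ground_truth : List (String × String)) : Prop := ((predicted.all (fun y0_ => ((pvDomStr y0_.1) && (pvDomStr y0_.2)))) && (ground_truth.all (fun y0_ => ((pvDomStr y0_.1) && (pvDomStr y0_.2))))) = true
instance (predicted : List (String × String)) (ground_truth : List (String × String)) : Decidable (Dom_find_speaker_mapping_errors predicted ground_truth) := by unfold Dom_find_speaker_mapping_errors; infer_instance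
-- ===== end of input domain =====

-- B replaces A's interleaved nested counter-dict updates by a staged group-by: materialize the
-- mismatched (gt,pred) pair list, dedupe the gt keys, and compute each count by list.count scans;
-- same result, no speed claim (objective: alternative).

-- ===== PORT A =====
-- name.strip().lower().replace("'", "").replace('"', '')
def pvNorm (name : String) : String :=
  PySem.Str.replace (PySem.Str.replace (PySem.Str.lower (PySem.Str.strip name)) "'" "") "\"" ""

def find_speaker_mapping_errors (predicted : List (String × String)) (ground_truth : List (String × String)) : List (String × List (String × Int)) :=
  if predicted.length ≠ ground_truth.length then [] else
  let final := (List.zip predicted ground_truth).foldl (fun d q =>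
    let pred_norm := pvNorm q.1.2
    let gt_norm := pvNorm q.2.2
    if pred_norm ≠ gt_norm then
      let d1 := if d.contains gt_norm then d else d.insert gt_norm PySem.Dict.empty
      -- mapping_errors[gt_norm]: the key is present by construction, so getD's default is never used
      let inner := d1.getD gt_norm PySem.Dict.empty
      d1.insert gt_norm (inner.insert pred_norm (inner.getD pred_norm 0 + 1))
    else d) PySem.Dict.empty
  final.items.map (fun kv => (kv.1, kv.2.items))

-- ===== PORT B =====
def find_speaker_mapping_errors_alt (predicted : List (String × String)) (ground_truth : List (String × String)) : List (String × List (String × Int)) :=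
  if predicted.length ≠ ground_truth.length then [] else
  -- stage 1: the mismatched normalized (gt, pred) pairs, in order
  let pairs := (List.zip predicted ground_truth).foldl (fun acc q =>
    let gn := pvNorm q.2.2
    let pn := pvNorm q.1.2
    if gn ≠ pn then acc ++ [(gn, pn)] else acc) []
  -- stage 2: for each distinct gt key (dict.fromkeys), count its preds by scanning the selection
  let result := (PySem.Set.ofList (pairs.map Prod.fst)).foldl (fun r gt =>
    let preds := (pairs.filter (fun e => e.1 == gt)).map Prod.snd
    r.insert gt ((PySem.Set.ofList preds).foldl
      (fun inner p => inner.insert p ((preds.count p : Int))) PySem.Dict.empty)) PySem.Dict.empty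
  result.items.map (fun kv => (kv.1, kv.2.items))

-- ===== PRECONDITION & SPEC =====
def Spec_find_speaker_mapping_errors (predicted : List (String × String)) (ground_truth : List (String × String)) (out : List (String × List (String × Int))) : Prop := out = find_speaker_mapping_errors_alt predicted ground_truth
instance (predicted : List (String × String)) (ground_truth : List (String × String)) (out : List (String × List (String × Int))) : Decidable (Spec_find_speaker_mapping_errors predicted ground_truth out) := by unfold Spec_find_speaker_mapping_errors; infer_instance

-- ===== CLAIM (what is proved, stated in full; the proofs are below) =====
def Claim_equal_find_speaker_mapping_errors : Prop := ∀ (predicted : List (String × String)) (ground_truth : List (String × String)), Dom_find_speaker_mapping_errors predicted ground_truth → Spec_find_speaker_mapping_errors predicted ground_truth (find_speaker_mapping_errors predicted ground_truth)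

-- ===== LEMMAS AND PROOFS =====

-- A's "update the nested dict at outer key k x" step
def pvStep {α : Type} (k : α → String) (f : PySem.Dict String Int → α → PySem.Dict String Int)
    (d : PySem.Dict String (PySem.Dict String Int)) (x : α) : PySem.Dict String (PySem.Dict String Int) :=
  let d1 := if d.contains (k x) then d else d.insert (k x) PySem.Dict.empty
  d1.insert (k x) (f (d1.getD (k x) PySem.Dict.empty) x)

-- the normalized (gt, pred) mismatch pairs of the zipped input, in order
def pvL (xs : List ((String × String) × (String × String))) : List (String × String) :=
  (xs.map (fun q => (pvNorm q.2.2, pvNorm q.1.2))).filter (fun kk => !(kk.1 == kk.2))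

-- both sides reduce to this common closed form
def pvCanon (L : List (String × String)) : List (String × List (String × Int)) :=
  (PySem.Set.ofList (L.map Prod.fst)).map (fun g =>
    (g, ((PySem.Set.ofList L).filter (fun kk => kk.1 == g)).map (fun kk => (kk.2, (L.count kk : Int)))))

theorem pvStep_keys {α : Type} (k : α → String) (f : PySem.Dict String Int → α → PySem.Dict String Int)
    (d : PySem.Dict String (PySem.Dict String Int)) (x : α) :
    (pvStep k f d x).keys = PySem.Set.add d.keys (k x) := by
  by_cases h : d.contains (k x) = true
  · have hm : k x ∈ d.keys := (PySem.Dict.contains_iff_mem_keys d (k x)).mp h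
    simp [pvStep, h, PySem.Dict.keys_insert_of_contains d _ h, PySem.Set.add_of_mem hm]
  · have hb : d.contains (k x) = false := by simpa using h
    have hm : k x ∉ d.keys := fun hc => h ((PySem.Dict.contains_iff_mem_keys d (k x)).mpr hc)
    simp [pvStep, hb,
      PySem.Dict.keys_insert_of_contains _ _ (PySem.Dict.contains_insert_self d (k x) PySem.Dict.empty),
      PySem.Dict.keys_insert_of_not_contains d _ hb, PySem.Set.add_of_not_mem hm]

theorem pvStep_getD {α : Type} (k : α → String) (f : PySem.Dict String Int → α → PySem.Dict String Int)
    (d : PySem.Dict String (PySem.Dict String Int)) (x : α) (g : String) :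
    (pvStep k f d x).getD g PySem.Dict.empty =
      if k x = g then f (d.getD g PySem.Dict.empty) x else d.getD g PySem.Dict.empty := by
  by_cases h : d.contains (k x) = true
  · by_cases hg : k x = g
    · subst hg; simp [pvStep, h, PySem.Dict.getD_insert]
    · have hg' : ¬ (g = k x) := fun hh => hg hh.symm
      simp [pvStep, h, PySem.Dict.getD_insert, hg, hg']
  · have hb : d.contains (k x) = false := by simpa using h
    by_cases hg : k x = g
    · subst hg
      simp [pvStep, hb, PySem.Dict.getD_insert, PySem.Dict.getD_of_not_contains d _ hb]
    · have hg' : ¬ (g = k x) := fun hh => hg hh.symm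
      simp [pvStep, hb, PySem.Dict.getD_insert, hg, hg']

theorem pvFoldl_pvStep_keys {α : Type} (k : α → String) (f : PySem.Dict String Int → α → PySem.Dict String Int)
    (l : List α) (d : PySem.Dict String (PySem.Dict String Int)) (h : d.keys.Nodup) :
    (l.foldl (pvStep k f) d).keys = PySem.Set.update d.keys (l.map k) := by
  induction l generalizing d with
  | nil => simp [PySem.Set.update_nil]
  | cons x l ih =>
    have hk := pvStep_keys k f d x
    have hnd : (pvStep k f d x).keys.Nodup := by
      rw [hk]
      by_cases hm : k x ∈ d.keys
      · rw [PySem.Set.add_of_mem hm]; exact h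
      · rw [PySem.Set.add_of_not_mem hm]
        exact List.Nodup.append h (List.nodup_singleton _) (by simpa using hm)
    simp only [List.foldl_cons, List.map_cons, PySem.Set.update_cons]
    rw [ih (pvStep k f d x) hnd, hk]

theorem pvFoldl_pvStep_getD {α : Type} (k : α → String) (f : PySem.Dict String Int → α → PySem.Dict String Int)
    (l : List α) (d : PySem.Dict String (PySem.Dict String Int)) (g : String) :
    (l.foldl (pvStep k f) d).getD g PySem.Dict.empty =
      (l.filter (fun x => k x == g)).foldl f (d.getD g PySem.Dict.empty) := by
  induction l generalizing d with
  | nil => simp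
  | cons x l ih =>
    rw [List.foldl_cons, ih (pvStep k f d x)]
    by_cases hg : k x = g
    · simp [List.filter_cons, hg, pvStep_getD]
    · simp [List.filter_cons, hg, pvStep_getD]

theorem pvOfList_map_ofList {α β : Type} [BEq α] [LawfulBEq α] [BEq β] [LawfulBEq β] (l : List α) (f : α → β) :
    PySem.Set.ofList ((PySem.Set.ofList l).map f) = PySem.Set.ofList (l.map f) := by
  induction l using List.reverseRecOn with
  | nil => simp [PySem.Set.ofList_nil]
  | append_singleton l x ih =>
    by_cases hx : x ∈ PySem.Set.ofList l
    · have hxl : x ∈ l := (PySem.Set.mem_ofList l x).mp hx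
      have hfx : f x ∈ PySem.Set.ofList (l.map f) :=
        (PySem.Set.mem_ofList _ _).mpr (List.mem_map_of_mem hxl)
      rw [PySem.Set.ofList_append_singleton, PySem.Set.add_of_mem hx, ih, List.map_append,
        List.map_singleton, PySem.Set.ofList_append_singleton, PySem.Set.add_of_mem hfx]
    · rw [PySem.Set.ofList_append_singleton, PySem.Set.add_of_not_mem hx, List.map_append,
        List.map_singleton, PySem.Set.ofList_append_singleton, ih, List.map_append,
        List.map_singleton, PySem.Set.ofList_append_singleton]

theorem pvOfList_filter {α : Type} [BEq α] [LawfulBEq α] (l : List α) (p : α → Bool) :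
    PySem.Set.ofList (l.filter p) = (PySem.Set.ofList l).filter p := by
  induction l using List.reverseRecOn with
  | nil => simp [PySem.Set.ofList_nil]
  | append_singleton l x ih =>
    by_cases hx : x ∈ PySem.Set.ofList l
    · rw [PySem.Set.ofList_append_singleton, PySem.Set.add_of_mem hx, ← ih, List.filter_append]
      by_cases hp : p x = true
      · have hxf : x ∈ PySem.Set.ofList (l.filter p) :=
          (PySem.Set.mem_ofList _ _).mpr (List.mem_filter.mpr ⟨(PySem.Set.mem_ofList l x).mp hx, hp⟩)
        simp [hp, PySem.Set.ofList_append_singleton, PySem.Set.add_of_mem hxf]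
      · simp [hp]
    · rw [PySem.Set.ofList_append_singleton, PySem.Set.add_of_not_mem hx, List.filter_append,
        List.filter_append]
      by_cases hp : p x = true
      · have hxf : x ∉ PySem.Set.ofList (l.filter p) := fun hc =>
          hx ((PySem.Set.mem_ofList l x).mpr (List.mem_filter.mp ((PySem.Set.mem_ofList _ _).mp hc)).1)
        have hx2 : x ∉ (PySem.Set.ofList l).filter p := fun hc => hx (List.mem_filter.mp hc).1
        simp [hp, PySem.Set.ofList_append_singleton, ih, PySem.Set.add_of_not_mem hx2]
      · simp [hp, ih]

theorem pvCount_pair (L : List (String × String)) (g p : String) :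
    ((L.filter (fun x => x.1 == g)).map (fun x => x.2)).count p = L.count (g, p) := by
  induction L with
  | nil => simp
  | cons x L ih =>
    by_cases h1 : x.1 = g
    · by_cases h2 : x.2 = p
      · have hx : x = (g, p) := by cases x; simp_all
        simp [h1, hx, ih]
      · have hx : x ≠ (g, p) := by cases x; simp_all
        simp [h1, h2, hx, ih]
    · have hx : x ≠ (g, p) := by cases x; simp_all
      simp [h1, hx, ih]

-- the snd-projections of the deduped mismatch pairs sharing one gt key are distinct
theorem pvNodup_snd (L : List (String × String)) (g : String) :
    ((((PySem.Set.ofList L).filter (fun kk => kk.1 == g))).map (fun kk => kk.2)).Nodup := by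
  apply List.Nodup.map_on
  · intro a ha b hb hab
    have ha' := List.mem_filter.mp ha
    have hb' := List.mem_filter.mp hb
    have hag : a.1 = g := by simpa using ha'.2
    have hbg : b.1 = g := by simpa using hb'.2
    cases a; cases b; simp_all
  · exact List.Nodup.filter _ (PySem.Set.nodup_ofList L)

-- ofList commutes into the snd-projection of the filtered pairs
theorem pvOfList_snd (L : List (String × String)) (g : String) :
    PySem.Set.ofList ((L.filter (fun x => x.1 == g)).map (fun x => x.2)) =
      ((PySem.Set.ofList L).filter (fun kk => kk.1 == g)).map (fun kk => kk.2) := by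
  rw [← pvOfList_map_ofList (L.filter (fun x => x.1 == g)) (fun x => x.2), pvOfList_filter]
  exact PySem.Set.ofList_eq_self_of_nodup _ (pvNodup_snd L g)

-- A's interleaved nested loop, on the mismatch-pair list, equals the closed form
theorem pvCharA (L : List (String × String)) :
    ((L.foldl (pvStep Prod.fst (fun inner x => inner.insert x.2 (inner.getD x.2 0 + 1))) PySem.Dict.empty).items.map (fun kv => (kv.1, kv.2.items)))
    = pvCanon L := by
  have hempty : (PySem.Dict.empty : PySem.Dict String (PySem.Dict String Int)).keys.Nodup := by
    simp [PySem.Dict.keys_empty]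
  have hKA : (L.foldl (pvStep Prod.fst (fun inner x => inner.insert x.2 (inner.getD x.2 0 + 1))) PySem.Dict.empty).keys
      = PySem.Set.ofList (L.map Prod.fst) := by
    rw [pvFoldl_pvStep_keys _ _ _ _ hempty]
    simp only [PySem.Dict.keys_empty]
    rfl
  have hndA : (L.foldl (pvStep Prod.fst (fun inner x => inner.insert x.2 (inner.getD x.2 0 + 1))) PySem.Dict.empty).keys.Nodup := by
    rw [hKA]; exact PySem.Set.nodup_ofList _
  have hGA : ∀ g : String,
      ((L.foldl (pvStep Prod.fst (fun inner x => inner.insert x.2 (inner.getD x.2 0 + 1))) PySem.Dict.empty).getD g PySem.Dict.empty).items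
      = ((PySem.Set.ofList L).filter (fun kk => kk.1 == g)).map (fun kk => (kk.2, (L.count kk : Int))) := by
    intro g
    rw [pvFoldl_pvStep_getD, PySem.Dict.getD_empty]
    rw [show (L.filter (fun x => Prod.fst x == g)).foldl
          (fun (inner : PySem.Dict String Int) (x : String × String) => inner.insert x.2 (inner.getD x.2 0 + 1)) PySem.Dict.empty
        = ((L.filter (fun x => Prod.fst x == g)).map (fun x => x.2)).foldl
          (fun (inner : PySem.Dict String Int) p => inner.insert p (inner.getD p 0 + 1)) PySem.Dict.empty
      from (List.foldl_map (f := fun x : String × String => x.2)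
        (g := fun (inner : PySem.Dict String Int) p => inner.insert p (inner.getD p 0 + 1))
        (l := L.filter (fun x => Prod.fst x == g)) (init := PySem.Dict.empty)).symm]
    rw [PySem.Dict.foldl_insert_getD_add_one_eq_counter, PySem.Dict.items_counter]
    rw [show (fun x : String × String => Prod.fst x == g) = (fun x : String × String => x.1 == g) from rfl]
    rw [pvOfList_snd L g, List.map_map]
    apply List.map_congr_left
    intro kk hkk
    have hkg : kk.1 = g := by simpa using (List.mem_filter.mp hkk).2
    have := pvCount_pair L g kk.2
    simp only [Function.comp]
    rw [this, ← hkg]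
  rw [PySem.Dict.items_eq_map_keys _ hndA PySem.Dict.empty, hKA, List.map_map]
  unfold pvCanon
  apply List.map_congr_left
  intro g _
  simp only [Function.comp]
  rw [hGA g]

-- B's group-by-then-count stage equals the same closed form
theorem pvCharB (L : List (String × String)) :
    (((PySem.Set.ofList (L.map Prod.fst)).foldl (fun r gt =>
        let preds := (L.filter (fun e => e.1 == gt)).map Prod.snd
        r.insert gt ((PySem.Set.ofList preds).foldl
          (fun inner p => inner.insert p ((preds.count p : Int))) PySem.Dict.empty)) PySem.Dict.empty).items.map
      (fun kv => (kv.1, kv.2.items)))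
    = pvCanon L := by
  -- name the inner-dict builder
  set F : String → PySem.Dict String Int := fun gt =>
    (PySem.Set.ofList ((L.filter (fun e => e.1 == gt)).map Prod.snd)).foldl
      (fun inner p => inner.insert p ((((L.filter (fun e => e.1 == gt)).map Prod.snd).count p : Int)))
      PySem.Dict.empty with hF
  have houter : ((PySem.Set.ofList (L.map Prod.fst)).foldl (fun r gt =>
        let preds := (L.filter (fun e => e.1 == gt)).map Prod.snd
        r.insert gt ((PySem.Set.ofList preds).foldl
          (fun inner p => inner.insert p ((preds.count p : Int))) PySem.Dict.empty)) PySem.Dict.empty).items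
      = (PySem.Set.ofList (L.map Prod.fst)).map (fun gt => (gt, F gt)) := by
    have := PySem.Dict.items_foldl_insert_fresh
      (PySem.Set.ofList (L.map Prod.fst)) (fun gt => gt) F
      (PySem.Dict.empty)
      (fun a _ => PySem.Dict.contains_empty _)
      (by simpa using PySem.Set.nodup_ofList (L.map Prod.fst))
    simpa [hF] using this
  have hinner : ∀ gt : String, (F gt).items
      = ((PySem.Set.ofList L).filter (fun kk => kk.1 == gt)).map (fun kk => (kk.2, (L.count kk : Int))) := by
    intro gt
    have hfresh : ∀ p ∈ PySem.Set.ofList ((L.filter (fun e => e.1 == gt)).map Prod.snd),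
        (PySem.Dict.empty : PySem.Dict String Int).contains p = false :=
      fun p _ => PySem.Dict.contains_empty _
    have hnd : (PySem.Set.ofList ((L.filter (fun e => e.1 == gt)).map Prod.snd)).map (fun p => p) |>.Nodup := by
      simpa using PySem.Set.nodup_ofList ((L.filter (fun e => e.1 == gt)).map Prod.snd)
    have hit := PySem.Dict.items_foldl_insert_fresh
      (PySem.Set.ofList ((L.filter (fun e => e.1 == gt)).map Prod.snd)) (fun p => p)
      (fun p => (((L.filter (fun e => e.1 == gt)).map Prod.snd).count p : Int))
      PySem.Dict.empty hfresh hnd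
    rw [hF]
    simp only at hit
    rw [hit]
    simp only [show (PySem.Dict.empty : PySem.Dict String Int).items = [] from rfl, List.nil_append]
    rw [show (fun e : String × String => e.1 == gt) = (fun e : String × String => e.1 == gt) from rfl]
    rw [show (PySem.Set.ofList ((L.filter (fun e : String × String => e.1 == gt)).map Prod.snd))
        = ((PySem.Set.ofList L).filter (fun kk => kk.1 == gt)).map (fun kk => kk.2) from pvOfList_snd L gt,
      List.map_map]
    apply List.map_congr_left
    intro kk hkk
    have hkg : kk.1 = gt := by simpa using (List.mem_filter.mp hkk).2
    have hc := pvCount_pair L gt kk.2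
    simp only [Function.comp]
    rw [hc, ← hkg]
  rw [houter, List.map_map]
  unfold pvCanon
  apply List.map_congr_left
  intro g _
  simp only [Function.comp]
  rw [hinner g]

-- A's zip loop, rewritten over the mismatch-pair list
theorem pvConvA (xs : List ((String × String) × (String × String))) (d : PySem.Dict String (PySem.Dict String Int)) :
    xs.foldl (fun d q =>
      let pred_norm := pvNorm q.1.2
      let gt_norm := pvNorm q.2.2
      if pred_norm ≠ gt_norm then
        let d1 := if d.contains gt_norm then d else d.insert gt_norm PySem.Dict.empty
        let inner := d1.getD gt_norm PySem.Dict.empty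
        d1.insert gt_norm (inner.insert pred_norm (inner.getD pred_norm 0 + 1))
      else d) d
    = (pvL xs).foldl (pvStep Prod.fst (fun inner x => inner.insert x.2 (inner.getD x.2 0 + 1))) d := by
  induction xs generalizing d with
  | nil => simp [pvL]
  | cons q xs ih =>
    simp only [pvL, List.map_cons, List.filter_cons, List.foldl_cons] at ih ⊢
    by_cases h : pvNorm q.1.2 = pvNorm q.2.2
    · rw [if_neg (by simpa using h)]
      have hb : (!(pvNorm q.2.2 == pvNorm q.1.2)) = false := by simp [h.symm]
      rw [hb]
      simp only [Bool.false_eq_true, if_false]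
      exact ih d
    · rw [if_pos h]
      have hb : (!(pvNorm q.2.2 == pvNorm q.1.2)) = true := by
        simp only [Bool.not_eq_true', beq_eq_false_iff_ne, ne_eq]
        exact fun hh => h hh.symm
      rw [hb]
      simp only [if_true, List.foldl_cons]
      rw [ih]
      congr 1

-- B's first stage builds exactly the mismatch-pair list
theorem pvConvB (xs : List ((String × String) × (String × String))) (acc : List (String × String)) :
    xs.foldl (fun acc q =>
      let gn := pvNorm q.2.2
      let pn := pvNorm q.1.2
      if gn ≠ pn then acc ++ [(gn, pn)] else acc) acc
    = acc ++ pvL xs := by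
  induction xs generalizing acc with
  | nil => simp [pvL]
  | cons q xs ih =>
    simp only [pvL, List.map_cons, List.filter_cons, List.foldl_cons] at ih ⊢
    by_cases h : pvNorm q.2.2 = pvNorm q.1.2
    · rw [if_neg (by simpa using h)]
      have hb : (!(pvNorm q.2.2 == pvNorm q.1.2)) = false := by simp [h]
      rw [hb]
      simp only [Bool.false_eq_true, if_false]
      exact ih acc
    · rw [if_pos h]
      have hb : (!(pvNorm q.2.2 == pvNorm q.1.2)) = true := by
        simp only [Bool.not_eq_true', beq_eq_false_iff_ne, ne_eq]
        exact h
      rw [hb]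
      simp only [if_true, List.foldl_cons]
      rw [ih, List.append_assoc]
      rfl

-- ===== VERDICT (by name: the statement is the Claim_ definition above) =====
theorem find_speaker_mapping_errors_spec : Claim_equal_find_speaker_mapping_errors := by
  intro predicted ground_truth _
  unfold Spec_find_speaker_mapping_errors find_speaker_mapping_errors find_speaker_mapping_errors_alt
  by_cases hlen : predicted.length ≠ ground_truth.length
  · simp [hlen]
  · simp only [hlen, if_false]
    rw [pvConvA, pvConvB]
    simp only [List.nil_append]
    rw [pvCharA, pvCharB]
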